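-- pv_equiv track=rewrite | github.com/sree2694/web_pattern_profiling | feature_engineering.py | calculate_domain_category_counts
-- ===== SOURCE A (Python) =====
-- DOMAIN_CATEGORIES = {
--     'social': ['facebook.com', 'instagram.com', 'twitter.com'],
--     'info': ['google.com', 'wikipedia.org', 'stackoverflow.com'],
--     'shopping': ['amazon.com', 'reddit.com'],
--     'entertainment': ['youtube.com', 'netflix.com']
-- }
--
-- def calculate_domain_category_counts(browsing_sequence):
--     """
--     Calculates counts for different domain categories.
--     """
--     category_counts = {'social': 0, 'info': 0, 'shopping': 0, 'entertainment': 0}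
--
--     for domain in browsing_sequence:
--         for category, domains in DOMAIN_CATEGORIES.items():
--             if domain in domains:
--                 category_counts[category] += 1
--                 break
--
--     return category_counts
-- ===== SOURCE B (Python) =====
-- DOMAIN_CATEGORIES = {
--     'social': ['facebook.com', 'instagram.com', 'twitter.com'],
--     'info': ['google.com', 'wikipedia.org', 'stackoverflow.com'],
--     'shopping': ['amazon.com', 'reddit.com'],
--     'entertainment': ['youtube.com', 'netflix.com']
-- }
--
-- def calculate_domain_category_counts(browsing_sequence):
--     # staged passes: for each category, count occurrences of each of its
--     # domains in the sequence and sum them (category lists are disjoint,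
--     # so this equals A's classify-and-increment pass)
--     return {cat: sum(browsing_sequence.count(d) for d in doms)
--             for cat, doms in DOMAIN_CATEGORIES.items()}
-- ===== Notes on version B (the rewrite author's own statement) =====
-- stated objective: simpler
-- what changed: B inverts the traversal: instead of classifying each visited domain with an inner scan and incrementing a mutable counts dict, it builds the result directly as a dict comprehension over the four categories, counting each catalogued domain's occurrences in the sequence with list.count and summing.
import Mathlib
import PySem

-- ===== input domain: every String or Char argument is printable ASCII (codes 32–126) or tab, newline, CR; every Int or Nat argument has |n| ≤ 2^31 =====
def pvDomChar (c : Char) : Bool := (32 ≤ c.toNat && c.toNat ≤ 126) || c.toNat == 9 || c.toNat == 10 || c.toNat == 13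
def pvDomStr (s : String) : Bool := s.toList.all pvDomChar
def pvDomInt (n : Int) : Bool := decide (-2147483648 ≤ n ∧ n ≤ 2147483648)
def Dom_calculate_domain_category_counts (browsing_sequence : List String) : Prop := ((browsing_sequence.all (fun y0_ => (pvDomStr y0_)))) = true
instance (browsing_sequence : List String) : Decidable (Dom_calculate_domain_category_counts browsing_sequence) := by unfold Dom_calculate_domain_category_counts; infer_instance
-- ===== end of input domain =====

-- B builds the result by staged counting passes (per category, sum of list.count of its domains) instead of A's classify-and-increment pass over the sequence; objective: simpler.

-- ===== PORT A =====
def DOMAIN_CATEGORIES : List (String × List String) :=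
  [("social", ["facebook.com", "instagram.com", "twitter.com"]),
   ("info", ["google.com", "wikipedia.org", "stackoverflow.com"]),
   ("shopping", ["amazon.com", "reddit.com"]),
   ("entertainment", ["youtube.com", "netflix.com"])]

-- the inner 'for category, domains in DOMAIN_CATEGORIES.items(): if domain in domains: …; break'
def pvInnerA (domain : String) : List (String × List String) → PySem.Dict String Int → PySem.Dict String Int
  | [], counts => counts
  | (cat, doms) :: rest, counts =>
    if doms.contains domain then counts.modify cat 0 (· + 1)   -- key always present, so modify = Python's '+= 1'
    else pvInnerA domain rest counts

def calculate_domain_category_counts (browsing_sequence : List String) : List (String × Int) :=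
  (browsing_sequence.foldl (fun counts domain => pvInnerA domain DOMAIN_CATEGORIES counts)
    (PySem.Dict.mk [("social", 0), ("info", 0), ("shopping", 0), ("entertainment", 0)])).items

-- ===== PORT B =====
-- '{cat: sum(browsing_sequence.count(d) for d in doms) for cat, doms in DOMAIN_CATEGORIES.items()}'
def calculate_domain_category_counts_alt (browsing_sequence : List String) : List (String × Int) :=
  DOMAIN_CATEGORIES.map (fun cv =>
    (cv.1, cv.2.foldl (fun s d => s + (PySem.List.count browsing_sequence d : Int)) 0))

-- ===== PRECONDITION & SPEC =====
def Spec_calculate_domain_category_counts (browsing_sequence : List String) (out : List (String × Int)) : Prop := out = calculate_domain_category_counts_alt browsing_sequence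
instance (browsing_sequence : List String) (out : List (String × Int)) : Decidable (Spec_calculate_domain_category_counts browsing_sequence out) := by unfold Spec_calculate_domain_category_counts; infer_instance

-- ===== CLAIM =====
def Claim_equal_calculate_domain_category_counts : Prop := ∀ (browsing_sequence : List String), Dom_calculate_domain_category_counts browsing_sequence → Spec_calculate_domain_category_counts browsing_sequence (calculate_domain_category_counts browsing_sequence)

-- ===== LEMMAS AND PROOFS =====
-- invariant of A's fold: starting from arbitrary per-category totals, the fold adds each category's domain counts
theorem pv_foldA (bs : List String) (a b c d : Int) :
    (bs.foldl (fun counts domain => pvInnerA domain DOMAIN_CATEGORIES counts)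
      (PySem.Dict.mk [("social", a), ("info", b), ("shopping", c), ("entertainment", d)])).items
    = [("social", a + (bs.count "facebook.com" : Int) + bs.count "instagram.com" + bs.count "twitter.com"),
       ("info", b + (bs.count "google.com" : Int) + bs.count "wikipedia.org" + bs.count "stackoverflow.com"),
       ("shopping", c + (bs.count "amazon.com" : Int) + bs.count "reddit.com"),
       ("entertainment", d + (bs.count "youtube.com" : Int) + bs.count "netflix.com")] := by
  induction bs generalizing a b c d with
  | nil => simp
  | cons x xs ih =>
    by_cases h_facebook_com : x = "facebook.com"
    · subst h_facebook_com
      rw [List.foldl_cons, show pvInnerA "facebook.com" DOMAIN_CATEGORIES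
          (PySem.Dict.mk [("social", a), ("info", b), ("shopping", c), ("entertainment", d)])
        = PySem.Dict.mk [("social", a + 1), ("info", b), ("shopping", c), ("entertainment", d)] from rfl, ih]
      simp; omega
    by_cases h_instagram_com : x = "instagram.com"
    · subst h_instagram_com
      rw [List.foldl_cons, show pvInnerA "instagram.com" DOMAIN_CATEGORIES
          (PySem.Dict.mk [("social", a), ("info", b), ("shopping", c), ("entertainment", d)])
        = PySem.Dict.mk [("social", a + 1), ("info", b), ("shopping", c), ("entertainment", d)] from rfl, ih]
      simp; omega
    by_cases h_twitter_com : x = "twitter.com"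
    · subst h_twitter_com
      rw [List.foldl_cons, show pvInnerA "twitter.com" DOMAIN_CATEGORIES
          (PySem.Dict.mk [("social", a), ("info", b), ("shopping", c), ("entertainment", d)])
        = PySem.Dict.mk [("social", a + 1), ("info", b), ("shopping", c), ("entertainment", d)] from rfl, ih]
      simp; omega
    by_cases h_google_com : x = "google.com"
    · subst h_google_com
      rw [List.foldl_cons, show pvInnerA "google.com" DOMAIN_CATEGORIES
          (PySem.Dict.mk [("social", a), ("info", b), ("shopping", c), ("entertainment", d)])
        = PySem.Dict.mk [("social", a), ("info", b + 1), ("shopping", c), ("entertainment", d)] from rfl, ih]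
      simp; omega
    by_cases h_wikipedia_org : x = "wikipedia.org"
    · subst h_wikipedia_org
      rw [List.foldl_cons, show pvInnerA "wikipedia.org" DOMAIN_CATEGORIES
          (PySem.Dict.mk [("social", a), ("info", b), ("shopping", c), ("entertainment", d)])
        = PySem.Dict.mk [("social", a), ("info", b + 1), ("shopping", c), ("entertainment", d)] from rfl, ih]
      simp; omega
    by_cases h_stackoverflow_com : x = "stackoverflow.com"
    · subst h_stackoverflow_com
      rw [List.foldl_cons, show pvInnerA "stackoverflow.com" DOMAIN_CATEGORIES
          (PySem.Dict.mk [("social", a), ("info", b), ("shopping", c), ("entertainment", d)])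
        = PySem.Dict.mk [("social", a), ("info", b + 1), ("shopping", c), ("entertainment", d)] from rfl, ih]
      simp; omega
    by_cases h_amazon_com : x = "amazon.com"
    · subst h_amazon_com
      rw [List.foldl_cons, show pvInnerA "amazon.com" DOMAIN_CATEGORIES
          (PySem.Dict.mk [("social", a), ("info", b), ("shopping", c), ("entertainment", d)])
        = PySem.Dict.mk [("social", a), ("info", b), ("shopping", c + 1), ("entertainment", d)] from rfl, ih]
      simp; omega
    by_cases h_reddit_com : x = "reddit.com"
    · subst h_reddit_com
      rw [List.foldl_cons, show pvInnerA "reddit.com" DOMAIN_CATEGORIES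
          (PySem.Dict.mk [("social", a), ("info", b), ("shopping", c), ("entertainment", d)])
        = PySem.Dict.mk [("social", a), ("info", b), ("shopping", c + 1), ("entertainment", d)] from rfl, ih]
      simp; omega
    by_cases h_youtube_com : x = "youtube.com"
    · subst h_youtube_com
      rw [List.foldl_cons, show pvInnerA "youtube.com" DOMAIN_CATEGORIES
          (PySem.Dict.mk [("social", a), ("info", b), ("shopping", c), ("entertainment", d)])
        = PySem.Dict.mk [("social", a), ("info", b), ("shopping", c), ("entertainment", d + 1)] from rfl, ih]
      simp; omega
    by_cases h_netflix_com : x = "netflix.com"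
    · subst h_netflix_com
      rw [List.foldl_cons, show pvInnerA "netflix.com" DOMAIN_CATEGORIES
          (PySem.Dict.mk [("social", a), ("info", b), ("shopping", c), ("entertainment", d)])
        = PySem.Dict.mk [("social", a), ("info", b), ("shopping", c), ("entertainment", d + 1)] from rfl, ih]
      simp; omega
    rw [List.foldl_cons, show pvInnerA x DOMAIN_CATEGORIES
          (PySem.Dict.mk [("social", a), ("info", b), ("shopping", c), ("entertainment", d)])
        = PySem.Dict.mk [("social", a), ("info", b), ("shopping", c), ("entertainment", d)] from by
          simp [pvInnerA, DOMAIN_CATEGORIES, h_facebook_com, h_instagram_com,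
            h_twitter_com, h_google_com, h_wikipedia_org,
            h_stackoverflow_com, h_amazon_com, h_reddit_com,
            h_youtube_com, h_netflix_com], ih]
    simp [h_facebook_com, h_instagram_com, h_twitter_com, h_google_com,
      h_wikipedia_org, h_stackoverflow_com, h_amazon_com, h_reddit_com, h_youtube_com, h_netflix_com]

-- ===== VERDICT =====
theorem calculate_domain_category_counts_spec : Claim_equal_calculate_domain_category_counts := by
  intro bs _
  unfold Spec_calculate_domain_category_counts calculate_domain_category_counts calculate_domain_category_counts_alt
  rw [pv_foldA]
  simp [DOMAIN_CATEGORIES, PySem.List.count_eq]
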